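-- pv_equiv track=rewrite | github.com/moff4/KFrame | plugins/neon/utils.py | apply_standart_headers
-- ===== SOURCE A (Python) =====
-- STANDART_HEADERS = [
--     'Server: kek-server',
--     'Content-type: text/html; charset=utf-8',
-- ]
--
-- def apply_standart_headers(headers):
--     for i in STANDART_HEADERS:
--         key = i.split(':')[0]
--         boo = False
--         for j in headers:
--             boo = boo or j.startswith(key)
--         if not boo:
--             headers.append(i)
--     return headers
-- ===== SOURCE B (Python) =====
-- STANDART_HEADERS = [
--     'Server: kek-server',
--     'Content-type: text/html; charset=utf-8',
-- ]
--
-- def apply_standart_headers(headers):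
--     # One pass over the original headers filling two presence flags,
--     # then append whichever standard header is missing (mutates `headers`).
--     has_server = False
--     has_ctype = False
--     for j in headers:
--         has_server = has_server or j.startswith('Server')
--         has_ctype = has_ctype or j.startswith('Content-type')
--     if not has_server:
--         headers.append(STANDART_HEADERS[0])
--     if not has_ctype:
--         headers.append(STANDART_HEADERS[1])
--     return headers
-- ===== Notes on version B (the rewrite author's own statement) =====
-- stated objective: simpler
-- what changed: B makes a single pass over the headers maintaining one presence flag per standard header (with the key prefixes written out once), then appends the missing ones, instead of A's per-standard-header rescans each recomputing the key with split(':').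
import Mathlib
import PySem

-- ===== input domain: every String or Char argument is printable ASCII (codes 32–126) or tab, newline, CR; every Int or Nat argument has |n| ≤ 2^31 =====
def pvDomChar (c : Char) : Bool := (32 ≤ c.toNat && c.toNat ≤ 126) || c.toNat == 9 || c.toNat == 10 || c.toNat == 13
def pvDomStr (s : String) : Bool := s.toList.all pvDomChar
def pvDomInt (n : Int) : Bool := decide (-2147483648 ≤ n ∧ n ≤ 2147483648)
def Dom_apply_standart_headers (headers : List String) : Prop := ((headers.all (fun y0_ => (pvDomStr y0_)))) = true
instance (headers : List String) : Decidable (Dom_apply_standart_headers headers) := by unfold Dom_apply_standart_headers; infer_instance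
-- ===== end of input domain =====

-- B replaces A's per-standard-header rescans with one pass filling two presence flags, then appends the missing headers (simpler decomposition).
-- Both A and B mutate `headers` in place in Python (append); the equivalence proved here is about the return value.

-- ===== PORT A =====
def pvStdHeaders : List String := ["Server: kek-server", "Content-type: text/html; charset=utf-8"]

def apply_standart_headers (headers : List String) : List String :=
  pvStdHeaders.foldl (fun hs i =>
    -- key = i.split(':')[0]; split? is some since ":" ≠ "" and its result is nonempty, so [0] exists
    let key := ((PySem.Str.split? i ":").getD []).headD ""
    let boo := hs.foldl (fun boo j => boo || PySem.Str.startswith j key) false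
    if !boo then hs ++ [i] else hs) headers

-- ===== PORT B =====
def apply_standart_headers_alt (headers : List String) : List String :=
  let flags := headers.foldl (fun (st : Bool × Bool) j =>
    (st.1 || PySem.Str.startswith j "Server", st.2 || PySem.Str.startswith j "Content-type"))
    (false, false)
  let hs := if !flags.1 then headers ++ ["Server: kek-server"] else headers
  if !flags.2 then hs ++ ["Content-type: text/html; charset=utf-8"] else hs

-- ===== PRECONDITION & SPEC =====
def Spec_apply_standart_headers (headers : List String) (out : List String) : Prop := out = apply_standart_headers_alt headers
instance (headers : List String) (out : List String) : Decidable (Spec_apply_standart_headers headers out) := by unfold Spec_apply_standart_headers; infer_instance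

-- ===== CLAIM (what is proved, stated in full; the proofs are below) =====
def Claim_equal_apply_standart_headers : Prop := ∀ (headers : List String), Dom_apply_standart_headers headers → Spec_apply_standart_headers headers (apply_standart_headers headers)

-- ===== LEMMAS AND PROOFS =====

lemma pv_foldl_or (f : String → Bool) : ∀ (l : List String) (b : Bool),
    l.foldl (fun acc j => acc || f j) b = (b || l.any f) := by
  intro l
  induction l with
  | nil => simp
  | cons x xs ih => intro b; simp only [List.foldl_cons, List.any_cons, ih]; simp [Bool.or_assoc]

lemma pv_foldl_pair (f g : String → Bool) : ∀ (l : List String) (st : Bool × Bool),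
    l.foldl (fun (st : Bool × Bool) j => (st.1 || f j, st.2 || g j)) st
      = (st.1 || l.any f, st.2 || l.any g) := by
  intro l
  induction l with
  | nil => simp
  | cons x xs ih => intro st; simp only [List.foldl_cons, List.any_cons, ih]; simp [Bool.or_assoc]

lemma pv_key1 : ((PySem.Str.split? "Server: kek-server" ":").getD []).headD "" = "Server" := by decide

lemma pv_key2 : ((PySem.Str.split? "Content-type: text/html; charset=utf-8" ":").getD []).headD ""
    = "Content-type" := by decide

lemma pv_no_ct : PySem.Str.startswith "Server: kek-server" "Content-type" = false := by decide

-- ===== VERDICT (by name: the statement is the Claim_ definition above) =====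
theorem apply_standart_headers_spec : Claim_equal_apply_standart_headers := by
  intro headers _
  unfold Spec_apply_standart_headers
  simp only [apply_standart_headers, apply_standart_headers_alt, pvStdHeaders,
    List.foldl_cons, List.foldl_nil, pv_key1, pv_key2, pv_foldl_or, pv_foldl_pair,
    Bool.false_or]
  by_cases h1 : headers.any (fun j => PySem.Str.startswith j "Server") <;>
    by_cases h2 : headers.any (fun j => PySem.Str.startswith j "Content-type") <;>
      simp only [h1, h2, Bool.not_true, Bool.not_false, if_true,
        List.any_append, List.any_cons, List.any_nil, pv_no_ct,
        Bool.or_false] <;>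
      simp_all
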